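-- pv_equiv track=rewrite | github.com/ronGeva/algorithms | cracking_the_coding_interview/ex_17_8.py | naive_solutions
-- ===== SOURCE A (Python) =====
-- def validate_tower(tower: list[(int, int)]):
--     for i in range(len(tower) - 1):
--         if not (tower[i][0] < tower[i + 1][0] and tower[i][1] < tower[i + 1][1]):
--             return False
--     return True
--
-- def naive_solutions(items: list[(int, int)]):
--     items = sorted(items, key=lambda item: item[0])  # sort by height
--     biggest_groups_found = [[]]
--     possibilities = pow(2, len(items))
--     for possibility in range(possibilities):
--         current_tower = []
--         for i in range(len(items)):
--             if possibility & (1 << i):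
--                 current_tower.append(items[i])
--         if validate_tower(current_tower):
--             if len(current_tower) > len(biggest_groups_found[0]):
--                 biggest_groups_found = [current_tower]
--             elif len(current_tower) == len(biggest_groups_found[0]):
--                 biggest_groups_found.append(current_tower)
--
--     return biggest_groups_found
-- ===== SOURCE B (Python) =====
-- def naive_solutions(items):
--     items = sorted(items, key=lambda item: item[0])
--     chains = [[]]
--     for item in items:
--         chains = chains + [c + [item] for c in chains
--                            if not c or (c[-1][0] < item[0] and c[-1][1] < item[1])]
--     best = max(len(c) for c in chains)
--     return [c for c in chains if len(c) == best]
-- ===== Notes on version B (the rewrite author's own statement) =====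
-- stated objective: faster
-- what changed: A enumerates all 2^n subset masks of the sorted list and validates each candidate tower from scratch; B does one fold over the sorted items that extends only the already-valid increasing chains (so invalid subsets are never generated) followed by a single max-length filter pass.
-- intended difference: On the empty input list A returns [[], []] (mask 0 re-appends the empty tower next to the seed), while B returns [[]], the single empty tower, which is the intended answer. — e.g. on naive_solutions([]): A returns [[], []], B returns [[]]
import Mathlib
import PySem

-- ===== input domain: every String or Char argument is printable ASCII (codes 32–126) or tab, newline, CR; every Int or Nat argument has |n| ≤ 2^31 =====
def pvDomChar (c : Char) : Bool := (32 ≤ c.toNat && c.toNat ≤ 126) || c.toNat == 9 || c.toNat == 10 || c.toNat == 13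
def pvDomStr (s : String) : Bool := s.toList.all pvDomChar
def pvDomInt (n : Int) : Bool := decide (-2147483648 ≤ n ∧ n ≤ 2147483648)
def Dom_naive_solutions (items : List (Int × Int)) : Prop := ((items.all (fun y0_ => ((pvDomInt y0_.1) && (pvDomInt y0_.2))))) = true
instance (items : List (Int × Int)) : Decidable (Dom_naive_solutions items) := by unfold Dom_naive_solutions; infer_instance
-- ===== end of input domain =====

-- B replaces A's validation of all 2^n subsequence masks by a single fold that extends
-- only the already-valid increasing chains, then one max-length filter pass; on the empty
-- list B returns [[]] where A returns [[],[]] (stated as D_ below).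

-- ===== PORT A =====
-- validate_tower: 'for i in range(len(tower)-1): if not (...): return False; return True'
-- (early return False = all-quantified condition over the range)
def validate_tower (tower : List (Int × Int)) : Bool :=
  (PySem.List.pyRange 0 ((tower.length : Int) - 1) 1).all (fun i =>
    match PySem.List.pyGet? tower i, PySem.List.pyGet? tower (i + 1) with
    | some a, some b => decide (a.1 < b.1 ∧ a.2 < b.2)
    | _, _ => false)

-- 'possibility & (1 << i)' on the nonnegative masks of range(2**n) is exactly Nat.testBit,
-- so the mask loop is ported over List.range of Nats (exact: every mask is nonnegative).
def naive_solutions (items : List (Int × Int)) : List (List (Int × Int)) :=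
  let s := PySem.List.sorted items (fun item => item.1) false
  let possibilities := 2 ^ s.length
  (List.range possibilities).foldl (fun biggest possibility =>
    let current := (List.range s.length).foldl (fun cur i =>
      if possibility.testBit i then cur ++ [s.getD i (0, 0)] else cur) []
    if validate_tower current then
      if current.length > (biggest.headD []).length then [current]
      else if current.length = (biggest.headD []).length then biggest ++ [current]
      else biggest
    else biggest) [[]]

-- ===== PORT B =====
-- chains = chains + [c + [item] for c in chains if not c or (c[-1] < item in both dims)];
-- 'max(len(c) for c in chains)' ported as foldl max 0 (exact: chains always contains []).
def naive_solutions_alt (items : List (Int × Int)) : List (List (Int × Int)) :=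
  let s := PySem.List.sorted items (fun item => item.1) false
  let chains := s.foldl (fun chains item =>
    chains ++ (chains.filter (fun c =>
      match c.getLast? with
      | none => true
      | some l => decide (l.1 < item.1 ∧ l.2 < item.2))).map (fun c => c ++ [item])) [[]]
  let best := chains.foldl (fun m c => max m c.length) 0
  chains.filter (fun c => c.length == best)

-- ===== PRECONDITION & SPEC =====
-- On the empty list A returns [[],[]] (mask 0 re-appends the empty tower next to the seed),
-- B returns [[]]: the single empty tower, the intended answer.
def D_naive_solutions (items : List (Int × Int)) : Prop := items = []
instance (items : List (Int × Int)) : Decidable (D_naive_solutions items) := by unfold D_naive_solutions; infer_instance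
def Spec_naive_solutions (items : List (Int × Int)) (out : List (List (Int × Int))) : Prop := ¬ D_naive_solutions items → out = naive_solutions_alt items
instance (items : List (Int × Int)) (out : List (List (Int × Int))) : Decidable (Spec_naive_solutions items out) := by unfold Spec_naive_solutions; infer_instance
def pvDiffWitness_naive_solutions : (List (Int × Int)) := []
def pvDiffWitnessOut_naive_solutions : (List (List (Int × Int))) × (List (List (Int × Int))) := ([[], []], [[]])

-- ===== CLAIM (what is proved, stated in full; the proofs are below) =====
def Claim_unchanged_naive_solutions : Prop := ∀ (items : List (Int × Int)), Dom_naive_solutions items → Spec_naive_solutions items (naive_solutions items)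
def Claim_changed_naive_solutions : Prop := Dom_naive_solutions (pvDiffWitness_naive_solutions) ∧ D_naive_solutions (pvDiffWitness_naive_solutions) ∧ naive_solutions (pvDiffWitness_naive_solutions) = pvDiffWitnessOut_naive_solutions.1 ∧ naive_solutions_alt (pvDiffWitness_naive_solutions) = pvDiffWitnessOut_naive_solutions.2 ∧ pvDiffWitnessOut_naive_solutions.1 ≠ pvDiffWitnessOut_naive_solutions.2
def Claim_exact_naive_solutions : Prop := ∀ (items : List (Int × Int)), Dom_naive_solutions items → D_naive_solutions items → naive_solutions items ≠ naive_solutions_alt items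

-- ===== LEMMAS AND PROOFS =====

-- the strict-increase relation on both dimensions
def pvR (a b : Int × Int) : Prop := a.1 < b.1 ∧ a.2 < b.2

-- A's inner loop: the subsequence of s selected by mask m
lemma body_eq (c : List (Int × Int)) (k : Nat) :
    (match PySem.List.pyGet? c ((0 : Int) + (k : Nat)), PySem.List.pyGet? c ((0 : Int) + (k : Nat) + 1) with
     | some a, some b => decide (a.1 < b.1 ∧ a.2 < b.2)
     | _, _ => false)
    = match getElem? c k, getElem? c (k+1) with
      | some a, some b => decide (a.1 < b.1 ∧ a.2 < b.2)
      | _, _ => false := by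
  have h1 : ((0 : Int) + (k : Nat)) = ((k : Nat) : Int) := by ring
  have h2 : (((k : Nat) : Int) + 1) = (((k + 1 : Nat)) : Int) := by push_cast; ring
  rw [h1, h2, PySem.List.pyGet?_natCast, PySem.List.pyGet?_natCast]

lemma validate_iff (c : List (Int × Int)) : validate_tower c = true ↔ List.IsChain pvR c := by
  unfold validate_tower
  rw [PySem.List.pyRange_one, List.all_map, List.all_eq_true, List.isChain_iff_getElem]
  have hb : (((c.length : Int) - 1) - 0).toNat = c.length - 1 := by omega
  rw [hb]
  constructor
  · intro h i hi
    have h0 := h i (List.mem_range.mpr (by omega))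
    rw [Function.comp_apply, body_eq] at h0
    rw [List.getElem?_eq_getElem (by omega), List.getElem?_eq_getElem hi] at h0
    simpa [pvR] using h0
  · intro h i hi
    have hi' := List.mem_range.mp hi
    rw [Function.comp_apply, body_eq,
      List.getElem?_eq_getElem (show i < c.length by omega),
      List.getElem?_eq_getElem (show i + 1 < c.length by omega)]
    simpa [pvR] using h i (by omega)

def pvOk (c : List (Int × Int)) (x : Int × Int) : Bool :=
  match c.getLast? with
  | none => true
  | some l => decide (l.1 < x.1 ∧ l.2 < x.2)

lemma validate_append (c : List (Int × Int)) (x : Int × Int) :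
    validate_tower (c ++ [x]) = (validate_tower c && pvOk c x) := by
  rw [Bool.eq_iff_iff, Bool.and_eq_true, validate_iff, validate_iff]
  rw [List.isChain_append]
  unfold pvOk
  cases hl : c.getLast? with
  | none => simp [pvR]
  | some l => simp [pvR]


lemma validate_nil : validate_tower [] = true := by decide

def pvT (s : List (Int × Int)) (m : Nat) : List (Int × Int) :=
  (List.range s.length).foldl (fun cur i =>
    if m.testBit i then cur ++ [s.getD i (0, 0)] else cur) []

lemma pvT_lt (s : List (Int × Int)) (x : Int × Int) (m : Nat) (h : m < 2 ^ s.length) :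
    pvT (s ++ [x]) m = pvT s m := by
  unfold pvT
  rw [List.length_append, List.length_singleton, List.range_succ, List.foldl_append]
  rw [List.foldl_cons, List.foldl_nil]
  rw [Nat.testBit_lt_two_pow h]
  simp only [if_neg (Bool.false_ne_true)]
  apply PySem.List.foldl_congr_mem
  intro acc a ha
  have : a < s.length := List.mem_range.mp ha
  rw [List.getD_append _ _ _ _ this]

lemma pvT_ge (s : List (Int × Int)) (x : Int × Int) (m : Nat) (h : m < 2 ^ s.length) :
    pvT (s ++ [x]) (2 ^ s.length + m) = pvT s m ++ [x] := by
  unfold pvT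
  rw [List.length_append, List.length_singleton, List.range_succ, List.foldl_append]
  rw [List.foldl_cons, List.foldl_nil]
  rw [Nat.testBit_two_pow_add_eq, Nat.testBit_lt_two_pow h]
  simp only [Bool.not_false, if_true]
  have hg : (s ++ [x]).getD s.length (0, 0) = x := by simp
  rw [hg]
  congr 1
  apply PySem.List.foldl_congr_mem
  intro acc a ha
  have : a < s.length := List.mem_range.mp ha
  rw [List.getD_append _ _ _ _ this, Nat.testBit_two_pow_add_gt this]

def pvStep (acc : List (List (Int × Int))) (x : Int × Int) : List (List (Int × Int)) :=
  acc ++ acc.map (fun c => c ++ [x])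

lemma pvC_eq (s : List (Int × Int)) :
    (List.range (2 ^ s.length)).map (pvT s) = s.foldl pvStep [[]] := by
  induction s using List.reverseRecOn with
  | nil => rfl
  | append_singleton s x ih =>
    rw [List.foldl_append, List.foldl_cons, List.foldl_nil, ← ih]
    rw [List.length_append, List.length_singleton, pow_succ, mul_two, List.range_add]
    rw [List.map_append, List.map_map]
    unfold pvStep
    congr 1
    · exact List.map_congr_left (fun m hm => pvT_lt s x m (List.mem_range.mp hm))
    · rw [List.map_map]
      exact List.map_congr_left (fun m hm => pvT_ge s x m (List.mem_range.mp hm))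

def pvExt (acc : List (List (Int × Int))) (x : Int × Int) : List (List (Int × Int)) :=
  acc ++ (acc.filter (fun c => pvOk c x)).map (fun c => c ++ [x])

lemma filter_step (acc : List (List (Int × Int))) (x : Int × Int) :
    (pvStep acc x).filter validate_tower = pvExt (acc.filter validate_tower) x := by
  unfold pvStep pvExt
  rw [List.filter_append, List.filter_map, List.filter_filter]
  congr 2
  apply List.filter_congr
  intro c _
  rw [Function.comp_apply, validate_append]
  exact Bool.and_comm _ _

lemma pvFilter_foldl (s : List (Int × Int)) (acc : List (List (Int × Int))) :
    s.foldl pvExt (acc.filter validate_tower) = (s.foldl pvStep acc).filter validate_tower := by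
  induction s generalizing acc with
  | nil => rfl
  | cons y s ih =>
    rw [List.foldl_cons, List.foldl_cons, ← filter_step, ih]

def pvSel (b : List (List (Int × Int))) (t : List (Int × Int)) : List (List (Int × Int)) :=
  if t.length > (b.headD []).length then [t]
  else if t.length = (b.headD []).length then b ++ [t] else b

def pvF (a : Nat) (l : List (List (Int × Int))) : Nat :=
  l.foldl (fun m c => max m c.length) a

lemma pvF_ge_init (a : Nat) (l : List (List (Int × Int))) : a ≤ pvF a l := by
  induction l generalizing a with
  | nil => exact le_refl a
  | cons c l ih => exact le_trans (le_max_left a c.length) (ih _)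

lemma pvF_ge_mem (a : Nat) (l : List (List (Int × Int))) (c : List (Int × Int)) (hc : c ∈ l) :
    c.length ≤ pvF a l := by
  induction l generalizing a with
  | nil => cases hc
  | cons d l ih =>
    rcases List.mem_cons.mp hc with h | h
    · subst h; exact le_trans (le_max_right a c.length) (pvF_ge_init _ l)
    · exact ih _ h

lemma pvF_append_single (a : Nat) (l : List (List (Int × Int))) (t : List (Int × Int)) :
    pvF a (l ++ [t]) = max (pvF a l) t.length := by
  unfold pvF; rw [List.foldl_append]; rfl

lemma foldl_pvStep_prefix (s : List (Int × Int)) (acc : List (List (Int × Int))) :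
    ∃ r, s.foldl pvStep acc = acc ++ r := by
  induction s generalizing acc with
  | nil => exact ⟨[], by simp⟩
  | cons y s ih =>
    obtain ⟨r, hr⟩ := ih (pvStep acc y)
    exact ⟨acc.map (fun c => c ++ [y]) ++ r, by rw [List.foldl_cons, hr]; simp [pvStep]⟩

lemma foldl_pvStep_shape (s : List (Int × Int)) (ts : List (List (Int × Int)))
    (h : ∀ c ∈ ts, c ≠ []) :
    ∃ ts', s.foldl pvStep ([] :: ts) = [] :: ts' ∧ ∀ c ∈ ts', c ≠ [] := by
  induction s generalizing ts with
  | nil => exact ⟨ts, rfl, h⟩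
  | cons y s ih =>
    rw [List.foldl_cons]
    have hstep : pvStep ([] :: ts) y = [] :: (ts ++ ([] ++ [y]) :: ts.map (fun c => c ++ [y])) := by
      simp [pvStep]
    rw [hstep]
    apply ih
    intro c hc
    rcases List.mem_append.mp hc with h1 | h1
    · exact h c h1
    · rcases List.mem_cons.mp h1 with h2 | h2
      · subst h2; simp
      · obtain ⟨d, _, hd⟩ := List.mem_map.mp h2
        subst hd; simp

lemma sel_fold (vs : List (List (Int × Int))) (hne : vs ≠ []) (hnb : ∀ c ∈ vs, c ≠ []) :
    vs.foldl pvSel [[], []] = vs.filter (fun c => c.length == pvF 0 vs)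
    ∧ ∃ c ∈ vs, c.length = pvF 0 vs := by
  induction vs using List.reverseRecOn with
  | nil => cases hne rfl
  | append_singleton vs t ih =>
    rcases List.eq_nil_or_concat vs with h0 | _
    · subst h0
      have ht : t ≠ [] := hnb t (by simp)
      have htl : 0 < t.length := List.length_pos_iff.mpr ht
      have hM : pvF 0 [t] = t.length := by simp [pvF]
      have hsel : pvSel [[], []] t = [t] := by
        unfold pvSel
        rw [if_pos (by simpa using htl)]
      constructor
      · rw [List.nil_append, List.foldl_cons, List.foldl_nil, hsel, hM]
        simp
      · exact ⟨t, by simp, by simp [pvF]⟩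
    · have hvs : vs ≠ [] := by rintro rfl; simp_all
      obtain ⟨heq, c0, hc0mem, hc0len⟩ := ih hvs (fun c hc => hnb c (by simp [hc]))
      set M0 := pvF 0 vs with hM0
      have hM0pos : 0 < M0 := by
        rw [← hc0len]; exact List.length_pos_iff.mpr (hnb c0 (by simp [hc0mem]))
      set prev := vs.filter (fun c => c.length == M0) with hprev
      have hc0prev : c0 ∈ prev := List.mem_filter.mpr ⟨hc0mem, by simp [hc0len]⟩
      have hprevne : prev ≠ [] := by rintro h; rw [h] at hc0prev; cases hc0prev
      have hhead : (prev.headD []).length = M0 := by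
        have hmem : prev.headD [] ∈ prev := by
          cases hp : prev with
          | nil => exact absurd hp hprevne
          | cons p ps => simp
        have := List.of_mem_filter hmem
        simpa using this
      have hfold : (vs ++ [t]).foldl pvSel [[], []] = pvSel prev t := by
        rw [List.foldl_append, heq, List.foldl_cons, List.foldl_nil]
      have hF : pvF 0 (vs ++ [t]) = max M0 t.length := pvF_append_single 0 vs t
      rcases lt_trichotomy t.length M0 with hlt | heq2 | hgt
      · have hmax : max M0 t.length = M0 := by omega
        have hsel : pvSel prev t = prev := by
          unfold pvSel
          rw [hhead, if_neg (by omega), if_neg (by omega)]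
        have hft : List.filter (fun c => c.length == M0) [t] = [] := by
          have : (t.length == M0) = false := by simp; omega
          simp [List.filter, this]
        constructor
        · rw [hfold, hF, hmax, hsel, List.filter_append, hft, List.append_nil, hprev]
        · exact ⟨c0, by simp [hc0mem], by rw [hF, hmax, hc0len]⟩
      · have hmax : max M0 t.length = M0 := by omega
        have hsel : pvSel prev t = prev ++ [t] := by
          unfold pvSel
          rw [hhead, if_neg (by omega), if_pos heq2]
        have hft : List.filter (fun c => c.length == M0) [t] = [t] := by
          have : (t.length == M0) = true := by simp [heq2]
          simp [List.filter, this]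
        constructor
        · rw [hfold, hF, hmax, hsel, List.filter_append, hft, hprev]
        · exact ⟨c0, by simp [hc0mem], by rw [hF, hmax, hc0len]⟩
      · have hmax : max M0 t.length = t.length := by omega
        have hsel : pvSel prev t = [t] := by
          unfold pvSel
          rw [hhead, if_pos hgt]
        have hfvs : List.filter (fun c => c.length == t.length) vs = [] := by
          rw [List.filter_eq_nil_iff]
          intro c hc
          have := pvF_ge_mem 0 vs c hc
          simp only [beq_iff_eq]
          omega
        have hft : List.filter (fun c => c.length == t.length) [t] = [t] := by
          simp
        constructor
        · rw [hfold, hF, hmax, hsel, List.filter_append, hfvs, hft, List.nil_append]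
        · exact ⟨t, by simp, by rw [hF, hmax]⟩


lemma validate_singleton (x : Int × Int) : validate_tower [x] = true := by
  rw [validate_iff]
  exact List.isChain_singleton _

theorem pv_main (items : List (Int × Int)) (hne : items ≠ []) :
    naive_solutions items = naive_solutions_alt items := by
  set s := PySem.List.sorted items (fun item => item.1) false with hs
  have hsne : s ≠ [] := by
    rw [hs]
    simpa [PySem.List.sorted_eq_nil_iff] using hne
  -- A as a fold of pvSel over the valid candidates
  have hA : naive_solutions items
      = ((List.range (2 ^ s.length)).map (pvT s)).foldl
          (fun b t => if validate_tower t then pvSel b t else b) [[]] := by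
    rw [List.foldl_map]
    rfl
  rw [hA, ← List.foldl_filter, pvC_eq]
  -- B's chains
  have hchains : s.foldl pvExt [[]] = (s.foldl pvStep [[]]).filter validate_tower := by
    have h0 : ([[]] : List (List (Int × Int))) = ([[]] : List (List (Int × Int))).filter validate_tower := by
      simp [validate_nil]
    calc s.foldl pvExt [[]] = s.foldl pvExt (([[]] : List (List (Int × Int))).filter validate_tower) := by rw [← h0]
      _ = (s.foldl pvStep [[]]).filter validate_tower := pvFilter_foldl s [[]]
  have hB : naive_solutions_alt items
      = (s.foldl pvExt [[]]).filter
          (fun c => c.length == (s.foldl pvExt [[]]).foldl (fun m c => max m c.length) 0) := by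
    rfl
  -- shape of the chain list
  obtain ⟨y, s', hys⟩ := List.exists_cons_of_ne_nil hsne
  have hsub1 : s.foldl pvStep [[]] = s'.foldl pvStep [[], [y]] := by
    rw [hys, List.foldl_cons]; rfl
  obtain ⟨r, hr⟩ := foldl_pvStep_prefix s' [[], [y]]
  obtain ⟨ts, hts, htsne⟩ := foldl_pvStep_shape s [] (by intro c hc; cases hc)
  have hts2 : ts = [y] :: r := by
    have := hts.symm.trans (hsub1.trans hr)
    simpa using this
  set vs := ts.filter validate_tower with hvs
  have hchain2 : (s.foldl pvStep [[]]).filter validate_tower = [] :: vs := by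
    rw [hts]
    simp [List.filter, validate_nil, hvs]
  have hvsne : vs ≠ [] := by
    rw [hvs, hts2]
    simp [List.filter, validate_singleton]
  have hvsnb : ∀ c ∈ vs, c ≠ [] := by
    intro c hc
    exact htsne c (List.mem_of_mem_filter hc)
  obtain ⟨hsel, c0, hc0, hc0len⟩ := sel_fold vs hvsne hvsnb
  have hM0pos : 0 < pvF 0 vs := by
    rw [← hc0len]; exact List.length_pos_iff.mpr (hvsnb c0 hc0)
  -- LHS
  rw [hchains] at hB
  rw [hchain2] at hB ⊢
  rw [List.foldl_cons]
  have hfirst : pvSel [[]] [] = [[], []] := by decide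
  rw [hfirst, hsel, hB]
  -- best over [] :: vs is pvF 0 vs
  have hbest : (([] : List (Int × Int)) :: vs).foldl (fun m c => max m c.length) 0 = pvF 0 vs := by
    rw [List.foldl_cons]; rfl
  rw [hbest]
  -- filter over [] :: vs drops the empty tower
  have hzero : ((([] : List (Int × Int)).length == pvF 0 vs)) = false := by
    simp; omega
  simp only [List.filter, hzero]

theorem naive_solutions_spec : Claim_unchanged_naive_solutions := by
  intro items _
  unfold Spec_naive_solutions D_naive_solutions
  intro hnD
  exact pv_main items hnD

theorem naive_solutions_changed : Claim_changed_naive_solutions := by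
  unfold Claim_changed_naive_solutions; decide

theorem naive_solutions_tight : Claim_exact_naive_solutions := by
  intro items _ hD
  unfold D_naive_solutions at hD
  subst hD
  decide
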